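-- pv_equiv track=rewrite | github.com/Adham-git-1985/Workflow-PNCECS | workflow/engine.py | _norm_role
-- ===== SOURCE A (Python) =====
-- def _norm_role(value: str | None) -> str:
--     s = (value or '').strip().lower()
--     if not s:
--         return ''
--     s = s.replace('-', '_').replace(' ', '_')
--     while '__' in s:
--         s = s.replace('__', '_')
--     return s.strip('_')
-- ===== SOURCE B (Python) =====
-- def _norm_role(value):
--     s = (value or '').strip().lower()
--     tokens = []
--     cur = []
--     for ch in s:
--         if ch in '-_ ':
--             if cur:
--                 tokens.append(''.join(cur))
--                 cur = []
--         else: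
--             cur.append(ch)
--     if cur:
--         tokens.append(''.join(cur))
--     return '_'.join(tokens)
-- ===== Notes on version B (the rewrite author's own statement) =====
-- stated objective: simpler
-- what changed: Replaces the replace-then-repeatedly-collapse-'__' while-loop plus strip('_') with a single left-to-right tokenizer that collects runs of non-separator characters and joins the non-empty tokens with '_'.
import Mathlib
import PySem

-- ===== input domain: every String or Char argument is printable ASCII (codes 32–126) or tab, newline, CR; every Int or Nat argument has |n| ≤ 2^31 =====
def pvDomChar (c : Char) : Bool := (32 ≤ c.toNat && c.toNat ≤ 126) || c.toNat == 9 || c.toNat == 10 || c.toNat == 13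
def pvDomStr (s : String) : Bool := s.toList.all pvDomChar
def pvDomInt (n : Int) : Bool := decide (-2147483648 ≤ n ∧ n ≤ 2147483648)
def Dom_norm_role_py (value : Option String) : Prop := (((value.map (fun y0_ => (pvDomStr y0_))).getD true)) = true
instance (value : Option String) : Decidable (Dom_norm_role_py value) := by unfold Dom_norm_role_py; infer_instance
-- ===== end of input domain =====

-- B replaces A's replace-then-repeatedly-collapse-'__' loop with one tokenize-and-rejoin pass; same return value on every input.

-- ===== PORT A =====
-- one left-to-right pass of Python's s.replace('__','_'); used only to prove termination of the while loop below
def pvRep : List Char → List Char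
  | [] => []
  | c :: t =>
    if ['_', '_'].isPrefixOf (c :: t) then '_' :: pvRep t.tail else c :: pvRep t
termination_by l => l.length
decreasing_by
  · simpa using Nat.lt_succ_of_le (List.length_tail_le t)
  · simp

theorem pvRep_nil : pvRep [] = [] := by simp [pvRep]

theorem pvRep_cons (c : Char) (t : List Char) :
    pvRep (c :: t) = if ['_', '_'].isPrefixOf (c :: t) then '_' :: pvRep t.tail else c :: pvRep t := by
  rw [pvRep]

theorem pvPrefixUU {c : Char} {t : List Char} (h : ['_', '_'].isPrefixOf (c :: t) = true) :
    c = '_' ∧ ∃ t2, t = '_' :: t2 := by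
  have h2 := List.isPrefixOf_iff_prefix.1 h
  obtain ⟨r, hr⟩ := h2
  cases t with
  | nil => simp at hr
  | cons d t2 =>
    simp at hr
    exact ⟨hr.1.symm, t2, by rw [hr.2.1]⟩

theorem pvRep_length_le (l : List Char) : (pvRep l).length ≤ l.length := by
  fun_induction pvRep l with
  | case1 => simp [pvRep_nil]
  | case2 c t h ih =>
    obtain ⟨hc, t2, ht⟩ := pvPrefixUU h
    subst ht
    simp at ih ⊢; omega
  | case3 c t h ih =>
    simpa using ih

theorem pvRep_length_lt (l : List Char) (h : ['_', '_'] <:+: l) :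
    (pvRep l).length < l.length := by
  fun_induction pvRep l with
  | case1 => simp at h
  | case2 c t hp ih =>
    obtain ⟨hc, t2, ht⟩ := pvPrefixUU hp
    subst ht
    have := pvRep_length_le t2
    simp at this ⊢; omega
  | case3 c t hp ih =>
    have h2 : ['_', '_'] <:+: t := by
      rcases (List.infix_cons_iff).1 h with h3 | h3
      · exact absurd (List.isPrefixOf_iff_prefix.2 h3) hp
      · exact h3
    simpa using ih h2

theorem pvGoUU (fuel : Nat) : ∀ (l acc : List Char), l.length ≤ fuel →
    PySem.Chars.replace.go ['_', '_'] ['_'] fuel l acc = acc.reverse ++ pvRep l := by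
  induction fuel with
  | zero =>
    intro l acc h
    have : l = [] := List.length_eq_zero_iff.1 (Nat.le_zero.1 h)
    subst this
    simp [PySem.Chars.replace.go, pvRep_nil]
  | succ n ih =>
    intro l acc h
    cases l with
    | nil => simp [PySem.Chars.replace.go, pvRep_nil]
    | cons c t =>
      rw [pvRep_cons]
      by_cases hp : ['_', '_'].isPrefixOf (c :: t) = true
      · obtain ⟨hc, t2, ht⟩ := pvPrefixUU hp
        subst ht; subst hc
        simp [PySem.Chars.replace.go, hp, ih t2 ('_' :: acc) (by simp at h; omega)]
      · simp [PySem.Chars.replace.go, hp, ih t (c :: acc) (by simp at h; omega)]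

theorem pvReplaceUU (l : List Char) :
    PySem.Chars.replace l ['_', '_'] ['_'] = pvRep l := by
  rw [PySem.Chars.replace]
  simpa using pvGoUU l.length l [] le_rfl

def pvNormLoop (s : String) : String :=
  if PySem.Str.isIn "__" s then pvNormLoop (PySem.Str.replace s "__" "_") else s
termination_by s.toList.length
decreasing_by
  rename_i h
  simp only [PySem.Str.toList_replace]
  have h2 : ("__" : String).toList = ['_', '_'] := by decide
  have h3 : ("_" : String).toList = ['_'] := by decide
  rw [h2, h3, pvReplaceUU]
  exact pvRep_length_lt _ ((PySem.Chars.isIn_iff_infix _ _).1 (by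
    simpa [PySem.Str.isIn, h2] using h))

def norm_role_py (value : Option String) : String :=
  let s := PySem.Str.lower (PySem.Str.strip (value.getD ""))
  if s = "" then ""
  else
    let s1 := PySem.Str.replace s "-" "_"
    let s2 := PySem.Str.replace s1 " " "_"
    PySem.Str.stripChars (pvNormLoop s2) "_"

-- ===== PORT B =====
def pvStep (st : List String × List Char) (ch : Char) : List String × List Char :=
  if ch ∈ ['-', '_', ' '] then
    if st.2 ≠ [] then (st.1 ++ [String.ofList st.2], []) else st
  else (st.1, st.2 ++ [ch])

def norm_role_py_alt (value : Option String) : String :=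
  let s := PySem.Str.lower (PySem.Str.strip (value.getD ""))
  let r := s.toList.foldl pvStep ([], [])
  let tokens := if r.2 ≠ [] then r.1 ++ [String.ofList r.2] else r.1
  PySem.Str.join "_" tokens

-- ===== PRECONDITION & SPEC =====
def Spec_norm_role_py (value : Option String) (out : String) : Prop := out = norm_role_py_alt value
instance (value : Option String) (out : String) : Decidable (Spec_norm_role_py value out) := by unfold Spec_norm_role_py; infer_instance

-- ===== CLAIM (what is proved, stated in full; the proofs are below) =====
def Claim_equal_norm_role_py : Prop := ∀ (value : Option String), Dom_norm_role_py value → Spec_norm_role_py value (norm_role_py value)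

-- ===== LEMMAS AND PROOFS =====

-- test for the underscore separator
def pvU (c : Char) : Bool := c == '_'

-- the separator set of B
def pvSepB (c : Char) : Bool := decide (c ∈ (['-', '_', ' '] : List Char))

-- single-character substitution performed by A's two first replace calls
def pvM (c : Char) : Char := if c = '-' then '_' else if c = ' ' then '_' else c

-- collapse every run of underscores to a single underscore
def pvSqueeze : List Char → List Char
  | [] => []
  | c :: t => if pvU c then '_' :: pvSqueeze (t.dropWhile pvU) else c :: pvSqueeze t
termination_by l => l.length
decreasing_by
  · exact Nat.lt_succ_of_le (List.length_dropWhile_le ..)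
  · exact Nat.lt_succ_of_le le_rfl

-- B's tokenizer, recursively (cur = word under construction)
def pvW (sep : Char → Bool) (cur : List Char) : List Char → List (List Char)
  | [] => if cur = [] then [] else [cur]
  | c :: t => if sep c then (if cur = [] then pvW sep [] t else cur :: pvW sep [] t) else pvW sep (cur ++ [c]) t

def pvStripU (l : List Char) : List Char := PySem.Chars.stripChars l ['_']

def pvRstrip (l : List Char) : List Char := (l.reverse.dropWhile pvU).reverse

theorem pvContains_eq (c : Char) : (['_'] : List Char).contains c = pvU c := by
  cases h : c == '_' <;> simp_all [pvU]

theorem pvStripU_eq (l : List Char) :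
    pvStripU l = ((l.dropWhile pvU).reverse.dropWhile pvU).reverse := by
  simp only [pvStripU, PySem.Chars.stripChars]
  rw [show (fun c => (['_'] : List Char).contains c) = pvU from funext pvContains_eq]

-- ---- A's first two replaces are a map ----

theorem pvGoSingle (a b : Char) (fuel : Nat) : ∀ (l acc : List Char), l.length ≤ fuel →
    PySem.Chars.replace.go [a] [b] fuel l acc
      = acc.reverse ++ l.map (fun c => if c = a then b else c) := by
  induction fuel with
  | zero =>
    intro l acc h
    have : l = [] := List.length_eq_zero_iff.1 (Nat.le_zero.1 h)
    subst this
    simp [PySem.Chars.replace.go]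
  | succ n ih =>
    intro l acc h
    cases l with
    | nil => simp [PySem.Chars.replace.go]
    | cons c t =>
      by_cases hc : c = a
      · subst hc
        have hp : [c].isPrefixOf (c :: t) = true := by simp [List.isPrefixOf]
        simp [PySem.Chars.replace.go, hp, ih t (b :: acc) (by simp at h; omega)]
      · have hp : ¬ ([a].isPrefixOf (c :: t) = true) := by
          simp [List.isPrefixOf]
          exact fun h' => hc h'.symm
        simp [PySem.Chars.replace.go, hp, ih t (c :: acc) (by simp at h; omega), hc]

theorem pvReplaceSingle (l : List Char) (a b : Char) :
    PySem.Chars.replace l [a] [b] = l.map (fun c => if c = a then b else c) := by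
  rw [PySem.Chars.replace]
  simpa using pvGoSingle a b l.length l [] le_rfl

-- ---- pvRep on heads ----

theorem pvRep_cons_ne {c : Char} (t : List Char) (hc : c ≠ '_') :
    pvRep (c :: t) = c :: pvRep t := by
  rw [pvRep_cons, if_neg]
  simp [List.isPrefixOf]
  exact fun h => absurd h.symm hc

theorem pvRep_cons_uu (t : List Char) :
    pvRep ('_' :: '_' :: t) = '_' :: pvRep t := by
  rw [pvRep_cons, if_pos (by simp [List.isPrefixOf])]
  rfl

theorem pvSqueeze_nil : pvSqueeze [] = [] := by rw [pvSqueeze]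

-- ---- squeeze is invariant under one replace('__','_') pass ----

theorem pvSqueeze_cons_u (t : List Char) :
    pvSqueeze ('_' :: t) = '_' :: pvSqueeze (t.dropWhile pvU) := by
  rw [pvSqueeze]; simp [pvU]

theorem pvSqueeze_cons_ne {c : Char} (t : List Char) (hc : c ≠ '_') :
    pvSqueeze (c :: t) = c :: pvSqueeze t := by
  rw [pvSqueeze]; simp [pvU, hc]

theorem pvSR (n : Nat) : ∀ l : List Char, l.length ≤ n →
    pvSqueeze (pvRep l) = pvSqueeze l ∧
    pvSqueeze ((pvRep l).dropWhile pvU) = pvSqueeze (l.dropWhile pvU) := by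
  induction n with
  | zero =>
    intro l h
    have : l = [] := List.length_eq_zero_iff.1 (Nat.le_zero.1 h)
    subst this; simp [pvRep_nil]
  | succ n ih =>
    intro l h
    cases l with
    | nil => simp [pvRep_nil]
    | cons c t =>
      by_cases hc : c = '_'
      · subst hc
        cases t with
        | nil =>
          have h1 : pvRep ['_'] = ['_'] := by
            rw [pvRep_cons, if_neg (by simp [List.isPrefixOf]), pvRep_nil]
          rw [h1]
          exact ⟨rfl, rfl⟩
        | cons d t2 =>
          by_cases hd : d = '_'
          · subst hd
            have ht2 : t2.length ≤ n := by simp at h; omega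
            obtain ⟨_, ihQ⟩ := ih t2 ht2
            rw [pvRep_cons_uu]
            constructor
            · rw [pvSqueeze_cons_u, pvSqueeze_cons_u]
              simp [List.dropWhile_cons, pvU, ihQ]
            · simp [List.dropWhile_cons, pvU, ihQ]
          · have hlen : (d :: t2).length ≤ n := by simp at h ⊢; omega
            obtain ⟨ihP, _⟩ := ih (d :: t2) hlen
            have hrep : pvRep (d :: t2) = d :: pvRep t2 := pvRep_cons_ne t2 hd
            have hrepne : pvRep ('_' :: d :: t2) = '_' :: pvRep (d :: t2) := by
              rw [pvRep_cons, if_neg (by simp [List.isPrefixOf]; exact fun hh => hd hh.symm)]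
            have goal2 : pvSqueeze (d :: pvRep t2) = pvSqueeze (d :: t2) := by
              rw [← hrep, ihP]
            rw [hrepne, hrep]
            constructor
            · rw [pvSqueeze_cons_u, pvSqueeze_cons_u]
              rw [show (d :: pvRep t2).dropWhile pvU = d :: pvRep t2 from by
                    simp [List.dropWhile_cons, pvU, hd],
                  show (d :: t2).dropWhile pvU = d :: t2 from by
                    simp [List.dropWhile_cons, pvU, hd], goal2]
            · simp only [List.dropWhile_cons, show pvU '_' = true from rfl,
                show pvU d = false from by simp [pvU, hd], if_true, if_false]
              exact goal2
      · have hlen : t.length ≤ n := by simp at h; omega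
        obtain ⟨ihP, _⟩ := ih t hlen
        rw [pvRep_cons_ne t hc]
        constructor
        · rw [pvSqueeze_cons_ne _ hc, pvSqueeze_cons_ne _ hc, ihP]
        · simp only [List.dropWhile_cons, show pvU c = false from by simp [pvU, hc], if_false,
            Bool.false_eq_true]
          rw [pvSqueeze_cons_ne _ hc, pvSqueeze_cons_ne _ hc, ihP]

-- ---- squeeze is the identity once no '__' remains ----

theorem pvSqueeze_no_uu : ∀ l : List Char, ¬ (['_', '_'] <:+: l) → pvSqueeze l = l := by
  intro l
  fun_induction pvSqueeze l with
  | case1 => intro _; rfl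
  | case2 c t hcu ih =>
    intro h
    have hc : c = '_' := by simpa [pvU] using hcu
    subst hc
    have hdt : t.dropWhile pvU = t := by
      cases t with
      | nil => rfl
      | cons d t2 =>
        have hd : d ≠ '_' := by
          intro hh; subst hh
          exact h ⟨[], t2, by simp⟩
        simp [List.dropWhile_cons, pvU, hd]
    rw [hdt] at ih ⊢
    rw [ih (fun h2 => h (List.infix_cons h2))]
  | case3 c t hcu ih =>
    intro h
    rw [ih (fun h2 => h (List.infix_cons h2))]

-- ---- the while loop computes pvSqueeze ----

theorem pvNormLoop_toList (s : String) : (pvNormLoop s).toList = pvSqueeze s.toList := by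
  fun_induction pvNormLoop s with
  | case1 s hin ih =>
    rw [ih]
    have : (PySem.Str.replace s "__" "_").toList = pvRep s.toList := by
      rw [PySem.Str.toList_replace]
      have h2 : ("__" : String).toList = ['_', '_'] := by decide
      have h3 : ("_" : String).toList = ['_'] := by decide
      rw [h2, h3, pvReplaceUU]
    rw [this]
    exact (pvSR s.toList.length s.toList le_rfl).1
  | case2 s hin =>
    have hni : ¬ (['_', '_'] <:+: s.toList) := by
      rw [← PySem.Chars.isIn_iff_infix]
      simpa [PySem.Str.isIn, show ("__" : String).toList = ['_', '_'] from by decide] using hin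
    rw [pvSqueeze_no_uu _ hni]

-- ---- strip / rstrip plumbing ----

theorem pvStripU_nil : pvStripU [] = [] := by simp [pvStripU_eq]

theorem pvStripU_cons_u (l : List Char) : pvStripU ('_' :: l) = pvStripU l := by
  simp [pvStripU_eq, List.dropWhile_cons, pvU]

theorem pvStripU_append {cur : List Char} (y : List Char) (hne : cur ≠ [])
    (hcur : ∀ c ∈ cur, c ≠ '_') : pvStripU (cur ++ y) = cur ++ pvRstrip y := by
  obtain ⟨c, cur', rfl⟩ := List.exists_cons_of_ne_nil hne
  have hc : pvU c = false := by simp [pvU]; exact hcur c (by simp)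
  have hdw : List.dropWhile pvU ((c :: cur').reverse) = (c :: cur').reverse := by
    cases hrev : (c :: cur').reverse with
    | nil => simp at hrev
    | cons d z =>
      have hd : pvU d = false := by
        have hmem : d ∈ (c :: cur' : List Char) := by rw [← List.mem_reverse, hrev]; simp
        simp [pvU]; exact hcur d hmem
      simp [List.dropWhile_cons, hd]
  rw [pvStripU_eq]
  rw [show ((c :: cur') ++ y).dropWhile pvU = (c :: cur') ++ y from by
    simp [List.dropWhile_cons, hc]]
  rw [List.reverse_append, List.dropWhile_append]
  split
  · rename_i hemp
    have h0 : y.reverse.dropWhile pvU = [] := by simpa using hemp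
    rw [hdw]
    simp [pvRstrip, h0]
  · simp [pvRstrip]

theorem pvRstrip_eq_strip {e : Char} (z : List Char) (he : e ≠ '_') :
    pvRstrip (e :: z) = pvStripU (e :: z) := by
  rw [pvStripU_eq, pvRstrip]
  have : (e :: z).dropWhile pvU = e :: z := by simp [List.dropWhile_cons, pvU, he]
  rw [this]

theorem pvRstrip_cons_u {w : List Char} (hw : ∃ x ∈ w, pvU x = false) :
    pvRstrip ('_' :: w) = '_' :: pvRstrip w := by
  rw [pvRstrip, pvRstrip]
  have h1 : List.dropWhile pvU (w.reverse ++ ['_']) = List.dropWhile pvU w.reverse ++ ['_'] := by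
    rw [List.dropWhile_append, if_neg ?_]
    intro hemp
    obtain ⟨x, hx, hxf⟩ := hw
    have := List.dropWhile_eq_nil_iff.1 (List.isEmpty_iff.1 hemp) x (by simpa using hx)
    rw [this] at hxf; cases hxf
  simp [h1]

-- ---- words lemmas ----

theorem pvW_dropWhile (t : List Char) : pvW pvU [] (t.dropWhile pvU) = pvW pvU [] t := by
  induction t with
  | nil => rfl
  | cons c t ih =>
    by_cases hc : c = '_'
    · subst hc
      rw [List.dropWhile_cons]
      simp only [pvU, beq_self_eq_true, if_pos]
      rw [ih, pvW]
      simp [pvU]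
    · rw [List.dropWhile_cons, if_neg (by simp [pvU, hc])]

theorem pvW_ne_nil (t : List Char) : ∀ cur, cur ≠ [] → pvW pvU cur t ≠ [] := by
  induction t with
  | nil => intro cur h; simp [pvW, h]
  | cons c t ih =>
    intro cur h
    rw [pvW]
    by_cases hc : pvU c = true
    · simp [hc, h]
    · simp only [hc]
      exact (by simpa using ih (cur ++ [c]) (by simp))

theorem pvJoin_cons (a : List Char) (rest : List (List Char)) :
    PySem.Chars.join ['_'] (a :: rest)
      = a ++ (if rest = [] then [] else '_' :: PySem.Chars.join ['_'] rest) := by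
  cases rest with
  | nil => simp [PySem.Chars.join, List.intercalate]
  | cons b r => simp [PySem.Chars.join, List.intercalate, List.intersperse]

-- ---- the central lemma: strip('_') of the squeeze = join of the words ----

theorem pvMain (n : Nat) : ∀ t : List Char, t.length ≤ n →
    (∀ cur, cur ≠ [] → (∀ c ∈ cur, c ≠ '_') →
      pvStripU (cur ++ pvSqueeze t) = PySem.Chars.join ['_'] (pvW pvU cur t)) ∧
    pvStripU (pvSqueeze t) = PySem.Chars.join ['_'] (pvW pvU [] t) := by
  induction n with
  | zero =>
    intro t h
    have ht : t = [] := List.length_eq_zero_iff.1 (Nat.le_zero.1 h)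
    subst ht
    constructor
    · intro cur hne hcur
      rw [pvSqueeze_nil, List.append_nil, pvW, if_neg hne, pvJoin_cons, if_pos rfl,
        List.append_nil]
      have := pvStripU_append ([] : List Char) hne hcur
      simpa [pvRstrip] using this
    · rw [pvSqueeze_nil, pvStripU_nil, pvW, if_pos rfl]
      rfl
  | succ n ih =>
    intro t h
    constructor
    · intro cur hne hcur
      cases t with
      | nil =>
        rw [pvSqueeze_nil, List.append_nil, pvW, if_neg hne, pvJoin_cons, if_pos rfl,
          List.append_nil]
        have := pvStripU_append ([] : List Char) hne hcur
        simpa [pvRstrip] using this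
      | cons c t' =>
        by_cases hc : c = '_'
        · subst hc
          rw [pvSqueeze_cons_u]
          rw [pvW, if_pos (by simp [pvU]), if_neg hne]
          rw [pvStripU_append _ hne hcur]
          rw [pvJoin_cons]
          cases hd : t'.dropWhile pvU with
          | nil =>
            rw [pvSqueeze_nil]
            have hwnil : pvW pvU [] t' = [] := by rw [← pvW_dropWhile t', hd, pvW, if_pos rfl]
            rw [hwnil, if_pos rfl, List.append_nil]
            simp [pvRstrip, List.dropWhile_cons, pvU]
          | cons e d' =>
            have hne2 : t'.dropWhile pvU ≠ [] := by simp [hd]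
            have he : pvU e = false := by
              have h2 := List.head_dropWhile_not pvU hne2
              simp [hd] at h2
              exact h2
            have hene : e ≠ '_' := by simpa [pvU] using he
            have hsq : pvSqueeze (e :: d') = e :: pvSqueeze d' := pvSqueeze_cons_ne d' hene
            rw [pvRstrip_cons_u ⟨e, by rw [hsq]; simp, he⟩]
            rw [hsq, pvRstrip_eq_strip _ hene, ← hsq]
            have hlen : (e :: d').length ≤ n := by
              have h1 := List.length_dropWhile_le pvU t'
              rw [hd] at h1
              simp at h h1 ⊢
              omega
            rw [(ih (e :: d') hlen).2]
            have hwd : pvW pvU [] t' = pvW pvU [] (e :: d') := by rw [← pvW_dropWhile t', hd]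
            rw [← hwd, if_neg (by
              rw [hwd, pvW, if_neg (by simp [pvU, hene])]
              exact pvW_ne_nil d' ([] ++ [e]) (by simp))]
        · rw [pvSqueeze_cons_ne _ hc]
          rw [pvW, if_neg (by simp [pvU, hc])]
          have hlen : t'.length ≤ n := by simp at h; omega
          have := (ih t' hlen).1 (cur ++ [c]) (by simp)
            (by intro x hx
                rcases List.mem_append.1 hx with h1 | h1
                · exact hcur x h1
                · rw [List.mem_singleton.1 h1]; exact hc)
          rw [← this]
          simp
    · cases t with
      | nil => rw [pvSqueeze_nil, pvStripU_nil, pvW, if_pos rfl]; rfl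
      | cons c t' =>
        by_cases hc : c = '_'
        · subst hc
          rw [pvSqueeze_cons_u, pvStripU_cons_u]
          rw [pvW, if_pos (by simp [pvU]), if_pos rfl]
          have hlen : (t'.dropWhile pvU).length ≤ n := by
            have := List.length_dropWhile_le pvU t'
            simp at h; omega
          rw [(ih _ hlen).2, pvW_dropWhile]
        · rw [pvSqueeze_cons_ne _ hc]
          rw [pvW, if_neg (by simp [pvU, hc])]
          have hlen : t'.length ≤ n := by simp at h; omega
          have := (ih t' hlen).1 [c] (by simp) (by simpa using hc)
          simpa using this

-- ---- B's fold = pvW ----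

theorem pvFold (t : List Char) : ∀ (tokens : List String) (cur : List Char),
    (if (t.foldl pvStep (tokens, cur)).2 ≠ [] then
       (t.foldl pvStep (tokens, cur)).1 ++ [String.ofList (t.foldl pvStep (tokens, cur)).2]
     else (t.foldl pvStep (tokens, cur)).1)
      = tokens ++ (pvW pvSepB cur t).map String.ofList := by
  induction t with
  | nil =>
    intro tokens cur
    by_cases hc : cur = []
    · subst hc
      simp [pvW]
    · rw [pvW, if_neg hc]
      simp [hc]
  | cons c t ih =>
    intro tokens cur
    rw [List.foldl_cons]
    by_cases hm : c ∈ (['-', '_', ' '] : List Char)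
    · have hsep : pvSepB c = true := by simp [pvSepB, hm]
      by_cases hc : cur = []
      · subst hc
        have hstep : pvStep (tokens, ([] : List Char)) c = (tokens, []) := by
          simp [pvStep, hm]
        rw [hstep]
        simpa [pvW, hsep] using ih tokens []
      · have hstep : pvStep (tokens, cur) c = (tokens ++ [String.ofList cur], []) := by
          simp [pvStep, hm, hc]
        rw [hstep]
        simpa [pvW, hsep, hc] using ih (tokens ++ [String.ofList cur]) []
    · have hsep : pvSepB c = false := by simp [pvSepB, hm]
      have hstep : pvStep (tokens, cur) c = (tokens, cur ++ [c]) := by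
        simp [pvStep, hm]
      rw [hstep]
      simpa [pvW, hsep] using ih tokens (cur ++ [c])

-- ---- the two maps of A equal pvM, and mapping commutes with tokenizing ----

theorem pvMap_eq (l : List Char) :
    (l.map (fun c => if c = '-' then '_' else c)).map (fun c => if c = ' ' then '_' else c)
      = l.map pvM := by
  rw [List.map_map]
  apply List.map_congr_left
  intro c _
  by_cases h1 : c = '-' <;> by_cases h2 : c = ' ' <;> simp_all [pvM, Function.comp]

theorem pvW_map (t : List Char) : ∀ cur, pvW pvU cur (t.map pvM) = pvW pvSepB cur t := by
  induction t with
  | nil => intro cur; rfl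
  | cons c t ih =>
    intro cur
    by_cases hm : c ∈ (['-', '_', ' '] : List Char)
    · have hmc : pvM c = '_' := by
        simp at hm
        rcases hm with h | h | h <;> simp [pvM, h]
      have hsep : pvSepB c = true := by simp [pvSepB, hm]
      by_cases hc : cur = [] <;>
        simp [List.map_cons, hmc, pvW, hsep, hc, ih, pvU]
    · have h1 : c ≠ '-' := fun hh => hm (by simp [hh])
      have h2 : c ≠ ' ' := fun hh => hm (by simp [hh])
      have hcu : c ≠ '_' := fun hh => hm (by simp [hh])
      have hmc : pvM c = c := by simp [pvM, h1, h2]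
      have hsep : pvSepB c = false := by simp [pvSepB, hm]
      have hpu : pvU c = false := by simp [pvU, hcu]
      simp [List.map_cons, hmc, pvW, hsep, hpu, ih]

-- ---- assembly ----

theorem pvJoin_map (ws : List (List Char)) :
    (PySem.Str.join "_" (ws.map String.ofList)).toList = PySem.Chars.join ['_'] ws := by
  rw [PySem.Str.join]
  rw [show ("_" : String).toList = ['_'] from by decide]
  rw [List.map_map]
  rw [show String.toList ∘ String.ofList = id from funext (fun l => by simp)]
  simp

theorem pvStrip_toList (x : String) :
    (PySem.Str.stripChars x "_").toList = pvStripU x.toList := by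
  rw [PySem.Str.stripChars, show ("_" : String).toList = ['_'] from by decide]
  simp [pvStripU]

-- ===== VERDICT (by name: the statement is the Claim_ definition above) =====
theorem norm_role_py_spec : Claim_equal_norm_role_py := by
  intro value _
  unfold Spec_norm_role_py
  simp only [norm_role_py, norm_role_py_alt]
  by_cases hempty : PySem.Str.lower (PySem.Str.strip (value.getD "")) = ""
  · rw [if_pos hempty, hempty]
    rfl
  · rw [if_neg hempty]
    refine String.toList_inj.1 ?_
    have hL : (PySem.Str.replace (PySem.Str.replace (PySem.Str.lower (PySem.Str.strip (value.getD ""))) "-" "_") " " "_").toList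
        = ((PySem.Str.lower (PySem.Str.strip (value.getD ""))).toList).map pvM := by
      rw [PySem.Str.toList_replace, PySem.Str.toList_replace,
        show ("-" : String).toList = ['-'] from by decide,
        show (" " : String).toList = [' '] from by decide,
        show ("_" : String).toList = ['_'] from by decide,
        pvReplaceSingle, pvReplaceSingle, pvMap_eq]
    rw [pvStrip_toList, pvNormLoop_toList, hL]
    rw [(pvMain (((PySem.Str.lower (PySem.Str.strip (value.getD ""))).toList).map pvM).length _ le_rfl).2,
      pvW_map]
    rw [pvFold ((PySem.Str.lower (PySem.Str.strip (value.getD ""))).toList) [] []]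
    rw [List.nil_append, pvJoin_map]
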